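-- pv_equiv track=rewrite | github.com/IDAPluginProject/GhidraX | src/ghidra/core/address.py | bit_transitions
-- ===== SOURCE A (Python) =====
-- uintbmasks: list[int] = [
--     0x0,
--     0xFF,
--     0xFFFF,
--     0xFFFFFF,
--     0xFFFFFFFF,
--     0xFFFFFFFFFF,
--     0xFFFFFFFFFFFF,
--     0xFFFFFFFFFFFFFF,
--     0xFFFFFFFFFFFFFFFF,
-- ]
--
-- def calc_mask(size: int) -> int:
--     """Return a value appropriate for masking off the first *size* bytes."""
--     if size >= 8:
--         return uintbmasks[8]
--     return uintbmasks[size]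
--
-- def bit_transitions(val: int, sz: int) -> int:
--     """Calculate the number of bit transitions in the sized value."""
--     mask = calc_mask(sz)
--     val &= mask
--     count = 0
--     prev_bit = val & 1
--     for i in range(1, sz * 8):
--         cur_bit = (val >> i) & 1
--         if cur_bit != prev_bit:
--             count += 1
--         prev_bit = cur_bit
--     return count
-- ===== SOURCE B (Python) =====
-- uintbmasks: list[int] = [
--     0x0,
--     0xFF,
--     0xFFFF,
--     0xFFFFFF,
--     0xFFFFFFFF,
--     0xFFFFFFFFFF,
--     0xFFFFFFFFFFFF,
--     0xFFFFFFFFFFFFFF,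
--     0xFFFFFFFFFFFFFFFF,
-- ]
--
-- def bit_transitions(val: int, sz: int) -> int:
--     """Count bit transitions via XOR-with-shift and popcount instead of a bit loop."""
--     nbits = sz * 8 - 1          # number of adjacent-bit comparisons
--     if nbits <= 0:
--         return 0
--     v = val & uintbmasks[min(sz, 8)]
--     return ((v ^ (v >> 1)) & ((1 << nbits) - 1)).bit_count()
-- ===== Notes on version B (the rewrite author's own statement) =====
-- stated objective: faster
-- what changed: Replaces the per-bit loop (8*sz iterations comparing adjacent bits) with a closed-form bit trick: popcount of (v ^ (v>>1)) masked to the low sz*8-1 bits.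
-- crash fix: For sz < -9 A raises IndexError (negative-index lookup in uintbmasks falls off the list) while B returns 0, the value A itself returns for every other non-positive sz. — e.g. on bit_transitions(3, -10): A raises IndexError, B returns 0
import Mathlib
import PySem

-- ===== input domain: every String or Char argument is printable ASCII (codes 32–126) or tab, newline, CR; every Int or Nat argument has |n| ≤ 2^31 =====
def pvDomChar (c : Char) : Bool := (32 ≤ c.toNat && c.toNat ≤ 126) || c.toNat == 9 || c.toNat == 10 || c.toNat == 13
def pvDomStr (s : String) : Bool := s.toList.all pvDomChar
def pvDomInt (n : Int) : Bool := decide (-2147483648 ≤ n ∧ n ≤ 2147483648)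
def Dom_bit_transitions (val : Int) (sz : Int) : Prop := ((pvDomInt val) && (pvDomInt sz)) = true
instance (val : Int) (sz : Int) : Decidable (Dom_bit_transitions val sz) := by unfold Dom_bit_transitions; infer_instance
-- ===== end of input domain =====

-- B replaces A's 8*sz-step adjacent-bit loop by popcount of (v ^ (v>>1)) masked to the low
-- sz*8-1 bits (objective: faster, O(1) word operations instead of a loop over every bit).

-- ===== PORT A =====
def uintbmasks : List Int :=
  [0x0, 0xFF, 0xFFFF, 0xFFFFFF, 0xFFFFFFFF, 0xFFFFFFFFFF,
   0xFFFFFFFFFFFF, 0xFFFFFFFFFFFFFF, 0xFFFFFFFFFFFFFFFF]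

def calc_mask (size : Int) : Int :=
  if size ≥ 8 then (PySem.List.pyGet? uintbmasks 8).getD 0
  else (PySem.List.pyGet? uintbmasks size).getD 0   -- none = IndexError, excluded by Pre_

def bit_transitions (val : Int) (sz : Int) : Int :=
  let mask := calc_mask sz
  let v := PySem.Int.band val mask
  -- state = (count, prev_bit); the shift amount i is ≥ 1 throughout the range, so i.toNat is exact
  let s := (PySem.List.pyRange 1 (sz * 8) 1).foldl
    (fun st i =>
      let cur := PySem.Int.band (v >>> i.toNat) 1
      (if cur ≠ st.2 then st.1 + 1 else st.1, cur))
    (0, PySem.Int.band v 1)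
  s.1

-- ===== PORT B =====
def bit_transitions_alt (val : Int) (sz : Int) : Int :=
  let nbits := sz * 8 - 1
  if nbits ≤ 0 then 0
  else
    let v := PySem.Int.band val ((PySem.List.pyGet? uintbmasks (min sz 8)).getD 0)
    (PySem.Int.bitCount
      (PySem.Int.band (PySem.Int.bxor v (v >>> (1 : Nat))) ((1 <<< nbits.toNat) - 1)) : Int)

-- ===== PRECONDITION & SPEC =====
-- Pre_ excludes only sz < -9, where A raises IndexError (uintbmasks[sz] falls off the list;
-- -9 ≤ sz ≤ -1 wraps to a valid negative index and A returns 0 there).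
def Pre_bit_transitions (val : Int) (sz : Int) : Prop := -9 ≤ sz
instance (val : Int) (sz : Int) : Decidable (Pre_bit_transitions val sz) := by
  unfold Pre_bit_transitions; infer_instance

def pvWitness_bit_transitions : Int × Int := (13, 2)

-- For sz < -9 A raises IndexError while B returns 0, the value A returns for every other non-positive sz.
def Raises_bit_transitions (val : Int) (sz : Int) : Prop := sz < -9
instance (val : Int) (sz : Int) : Decidable (Raises_bit_transitions val sz) := by
  unfold Raises_bit_transitions; infer_instance
def pvRaiseWitness_bit_transitions : Int × Int := (3, -10)
def pvRaiseWitnessOut_bit_transitions : Int := 0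

def Spec_bit_transitions (val : Int) (sz : Int) (out : Int) : Prop := out = bit_transitions_alt val sz
instance (val : Int) (sz : Int) (out : Int) : Decidable (Spec_bit_transitions val sz out) := by
  unfold Spec_bit_transitions; infer_instance

-- ===== CLAIM (what is proved, stated in full; the proofs are below) =====
def Claim_equal_bit_transitions : Prop := ∀ (val : Int) (sz : Int), Dom_bit_transitions val sz → Pre_bit_transitions val sz → Spec_bit_transitions val sz (bit_transitions val sz)

def Claim_raises_bit_transitions : Prop := (∀ (val : Int) (sz : Int), Dom_bit_transitions val sz → Raises_bit_transitions val sz → ¬ Pre_bit_transitions val sz) ∧ (Dom_bit_transitions (pvRaiseWitness_bit_transitions.1) (pvRaiseWitness_bit_transitions.2) ∧ Raises_bit_transitions (pvRaiseWitness_bit_transitions.1) (pvRaiseWitness_bit_transitions.2) ∧ bit_transitions_alt (pvRaiseWitness_bit_transitions.1) (pvRaiseWitness_bit_transitions.2) = pvRaiseWitnessOut_bit_transitions)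

-- ===== LEMMAS AND PROOFS =====

-- transitions among the low n+1 bits of v, recursing on the value
def trN (v : Nat) : Nat → Nat
  | 0 => 0
  | n + 1 => (if v % 2 ≠ v / 2 % 2 then 1 else 0) + trN (v / 2) n

lemma trN_succ_high (v : Nat) (n : Nat) :
    trN v (n + 1) = trN v n + (if (v >>> (n + 1)) % 2 ≠ (v >>> n) % 2 then 1 else 0) := by
  induction n generalizing v with
  | zero =>
      simp only [trN, Nat.shiftRight_succ, Nat.shiftRight_eq_div_pow]
      simp [ne_comm]
  | succ n ih =>
      show (if v % 2 ≠ v / 2 % 2 then 1 else 0) + trN (v / 2) (n + 1) = _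
      rw [ih (v / 2)]
      have h1 : (v / 2) >>> (n + 1) = v >>> (n + 2) := by
        rw [Nat.shiftRight_eq_div_pow, Nat.shiftRight_eq_div_pow, Nat.div_div_eq_div_mul]
        congr 1; ring
      have h2 : (v / 2) >>> n = v >>> (n + 1) := by
        rw [Nat.shiftRight_eq_div_pow, Nat.shiftRight_eq_div_pow, Nat.div_div_eq_div_mul]
        congr 1; ring
      rw [h1, h2]
      show _ = (if v % 2 ≠ v / 2 % 2 then 1 else 0) + trN (v / 2) n + _
      simp only [show n + 1 + 1 = n + 2 from rfl]
      omega

lemma bitCount_natCast' (m : Nat) :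
    PySem.Int.bitCount (m : Int) = m % 2 + PySem.Int.bitCount ((m / 2 : Nat) : Int) := by
  rcases Nat.eq_zero_or_pos m with h | h
  · subst h; simp [PySem.Int.bitCount_zero]
  · exact PySem.Int.bitCount_natCast (m := m) h

-- B's masked popcount computes trN
lemma popB (n : Nat) (v : Nat) :
    PySem.Int.bitCount ((((v ^^^ (v >>> 1)) % 2 ^ n : Nat) : Int)) = trN v n := by
  induction n generalizing v with
  | zero => simp [trN, Nat.mod_one, PySem.Int.bitCount_zero]
  | succ n ih =>
      set x := v ^^^ (v >>> 1) with hx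
      rw [bitCount_natCast']
      have hmod : x % 2 ^ (n + 1) % 2 = x % 2 := Nat.mod_mod_of_dvd x ⟨2 ^ n, by ring⟩
      have hdiv : x % 2 ^ (n + 1) / 2 = x / 2 % 2 ^ n := by
        have := Nat.mod_mul_right_div_self x 2 (2 ^ n)
        rwa [show 2 * 2 ^ n = 2 ^ (n + 1) by ring] at this
      have hx2 : x / 2 = (v / 2) ^^^ ((v / 2) >>> 1) := by
        have hd : x >>> 1 = (v >>> 1) ^^^ ((v >>> 1) >>> 1) := Nat.shiftRight_xor_distrib
        have e1 : x >>> 1 = x / 2 := Nat.shiftRight_one x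
        have e2 : v >>> 1 = v / 2 := Nat.shiftRight_one v
        rw [e1, e2] at hd; exact hd
      rw [hmod, hdiv, hx2, ih (v / 2)]
      have hxor : ∀ a b : Nat, (a ^^^ b) % 2 = a % 2 ^^^ b % 2 := by
        intro a b
        have := Nat.testBit_xor a b 0
        simp [Nat.testBit_zero] at this
        rcases Nat.mod_two_eq_zero_or_one a with h1 | h1 <;>
        rcases Nat.mod_two_eq_zero_or_one b with h2 | h2 <;>
        simp [h1, h2] at this ⊢ <;> omega
      have hb : x % 2 = if v % 2 ≠ v / 2 % 2 then 1 else 0 := by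
        have e2 : v >>> 1 = v / 2 := Nat.shiftRight_one v
        rw [hx, hxor, e2]
        rcases Nat.mod_two_eq_zero_or_one v with h1 | h1 <;>
        rcases Nat.mod_two_eq_zero_or_one (v / 2) with h2 | h2 <;> simp [h1, h2]
      rw [hb]; rfl

-- casting helpers
lemma band_one_natCast (m : Nat) : PySem.Int.band (m : Int) 1 = ((m % 2 : Nat) : Int) := by
  have : (1 : Int) = ((1 : Nat) : Int) := rfl
  rw [this, PySem.Int.band_natCast, Nat.and_one_is_mod]

lemma shift_band_one (m k : Nat) :
    PySem.Int.band ((m : Int) >>> ((k : Nat) : Int)) 1 = (((m >>> k) % 2 : Nat) : Int) := by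
  have h : ((m : Int) >>> ((k : Nat) : Int)) = ((m >>> k : Nat) : Int) := by
    simp [Int.shiftRight_eq]
  rw [h, band_one_natCast]

-- the loop invariant for A's fold
lemma loopA (vN : Nat) (n : Nat) :
    (PySem.List.pyRange 1 (1 + (n : Int)) 1).foldl
      (fun st i =>
        let cur := PySem.Int.band ((vN : Int) >>> i.toNat) 1
        (if cur ≠ st.2 then st.1 + 1 else st.1, cur))
      ((0 : Int), PySem.Int.band (vN : Int) 1)
    = (((trN vN n : Nat) : Int), (((vN >>> n) % 2 : Nat) : Int)) := by
  induction n with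
  | zero =>
      rw [PySem.List.pyRange_one_eq_nil (by norm_num)]
      simp [trN, band_one_natCast]
  | succ n ih =>
      have hsp : (1 : Int) + ((n : Nat) + 1 : Nat) = (1 + (n : Int)) + 1 := by push_cast; ring
      rw [hsp, PySem.List.pyRange_one_succ_right (by omega), List.foldl_append, ih]
      simp only [List.foldl_cons, List.foldl_nil]
      have ht : (1 + (n : Int)).toNat = n + 1 := by omega
      rw [ht, shift_band_one]
      rw [trN_succ_high vN n]
      by_cases h : (vN >>> (n + 1)) % 2 = (vN >>> n) % 2
      · simp [h]
      · have h' : (((vN >>> (n + 1)) % 2 : Nat) : Int) ≠ (((vN >>> n) % 2 : Nat) : Int) := by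
          exact_mod_cast h
        rw [if_pos h', if_pos h]
        refine Prod.ext ?_ rfl
        push_cast
        ring

lemma mask_nonneg (i : Int) : 0 ≤ (PySem.List.pyGet? uintbmasks i).getD 0 := by
  rcases h : PySem.List.pyGet? uintbmasks i with _ | x
  · simp
  · have hx := PySem.List.mem_of_pyGet?_eq_some (xs := uintbmasks) (i := i) h
    have hall : ∀ y ∈ uintbmasks, (0 : Int) ≤ y := by decide
    simpa using hall x hx

lemma calc_mask_eq_min (sz : Int) (h1 : 1 ≤ sz) :
    calc_mask sz = (PySem.List.pyGet? uintbmasks (min sz 8)).getD 0 := by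
  unfold calc_mask
  by_cases h8 : sz ≥ 8
  · rw [if_pos h8, min_eq_right h8]
  · rw [if_neg h8, min_eq_left (by omega)]

-- ===== VERDICT (by name: the statement is the Claim_ definition above) =====
theorem bit_transitions_spec : Claim_equal_bit_transitions := by
  intro val sz _ hpre
  unfold Spec_bit_transitions
  by_cases hsz : sz ≤ 0
  · unfold bit_transitions bit_transitions_alt
    rw [PySem.List.pyRange_one_eq_nil (by omega : sz * 8 ≤ 1)]
    rw [if_pos (by omega : sz * 8 - 1 ≤ 0)]
    rfl
  · -- sz ≥ 1
    have h1 : 1 ≤ sz := by omega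
    unfold bit_transitions bit_transitions_alt
    rw [if_neg (by omega : ¬ sz * 8 - 1 ≤ 0)]
    rw [calc_mask_eq_min sz h1]
    dsimp only
    set M : Int := (PySem.List.pyGet? uintbmasks (min sz 8)).getD 0 with hM
    have hMn : 0 ≤ M := mask_nonneg _
    have hvn : 0 ≤ PySem.Int.band val M := by
      rw [PySem.Int.band_comm]
      exact PySem.Int.band_nonneg_of_nonneg_left val hMn
    set vN : Nat := (PySem.Int.band val M).toNat with hvN
    have hv : PySem.Int.band val M = (vN : Int) := (Int.toNat_of_nonneg hvn).symm
    set N : Nat := (sz * 8 - 1).toNat with hNdef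
    have hN : ((N : Nat) : Int) = sz * 8 - 1 := by omega
    rw [hv]
    -- A side
    have hrange : sz * 8 = 1 + ((N : Nat) : Int) := by omega
    rw [hrange, loopA vN N]
    -- B side
    have hs1 : ((vN : Int) >>> (1 : Nat)) = ((vN >>> 1 : Nat) : Int) := by simp
    rw [hs1, PySem.Int.bxor_natCast]
    have hmaskN : ((1 <<< N : Nat) : Int) - 1 = ((2 ^ N - 1 : Nat) : Int) := by
      have h2 : 1 ≤ 2 ^ N := Nat.one_le_two_pow
      rw [Nat.one_shiftLeft]
      push_cast [h2]
      ring
    rw [hmaskN, PySem.Int.band_natCast, Nat.and_two_pow_sub_one_eq_mod, popB N vN]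

theorem bit_transitions_raises : Claim_raises_bit_transitions := by
  unfold Claim_raises_bit_transitions
  exact ⟨fun val sz _ h => by unfold Raises_bit_transitions at h; unfold Pre_bit_transitions; omega,
         by decide⟩

-- self-check: the raise witness really lies outside Pre_ (via bit_transitions_raises)
theorem pvRaiseWitness_outside_pre_ok :
    ¬ Pre_bit_transitions pvRaiseWitness_bit_transitions.1 pvRaiseWitness_bit_transitions.2 := by
  have h := bit_transitions_raises
  unfold Claim_raises_bit_transitions at h
  exact h.1 _ _ (by decide) (by decide)
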